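/- GENERATED by c/gen_decode.py: decode facts of the image, one per distinct instruction byte string. -/
import UserX.DecodeImage

#decode_all Vorbis.Dec
  "01442478"  -- add DWORD PTR [rsp+0x78],eax
  "0f572de2640100"  -- xorps xmm5,XMMWORD PTR [rip+0x164e2]
  "0f84a9010000"  -- je 116387
  "0f8598000000"  -- jne 119b76
  "0f8e08010000"  -- jle 11504e
  "0fb64301"  -- movzx eax,BYTE PTR [rbx+0x1]
  "25ff030000"  -- and eax,0x3ff
  "3dfeffff7f"  -- cmp eax,0x7ffffffe
  "410fb75c5d00"  -- movzx ebx,WORD PTR [r13+rbx*2+0x0]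
  "4183c401"  -- add r12d,0x1
  "4189cd"  -- mov r13d,ecx
  "418d7424e8"  -- lea esi,[r12-0x18]
  "41f7dc"  -- neg r12d
  "44297c2478"  -- sub DWORD PTR [rsp+0x78],r15d
  "4488a334060000"  -- mov BYTE PTR [rbx+0x634],r12b
  "4489adb0000000"  -- mov DWORD PTR [rbp+0xb0],r13d
  "448b6c2424"  -- mov r13d,DWORD PTR [rsp+0x24]
  "448d7001"  -- lea r14d,[rax+0x1]
  "45893e"  -- mov DWORD PTR [r14],r15d
  "458d740500"  -- lea r14d,[r13+rax*1+0x0]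
  "4829c5"  -- sub rbp,rax
  "4869c048080000"  -- imul rax,rax,0x848
  "4883eb10"  -- sub rbx,0x10
  "4889742468"  -- mov QWORD PTR [rsp+0x68],rsi
  "488b442428"  -- mov rax,QWORD PTR [rsp+0x28]
  "488b9560ffffff"  -- mov rdx,QWORD PTR [rbp-0xa0]
  "488d586c"  -- lea rbx,[rax+0x6c]
  "488d7d0c"  -- lea rdi,[rbp+0xc]
  "488dbb52010000"  -- lea rdi,[rbx+0x152]
  "488dbd94000000"  -- lea rdi,[rbp+0x94]
  "48c7442410b38ab541"  -- mov QWORD PTR [rsp+0x10],0x41b58ab3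
  "49039e38080000"  -- add rbx,QWORD PTR [r14+0x838]
  "49895e08"  -- mov QWORD PTR [r14+0x8],rbx
  "498d7c1f21"  -- lea rdi,[r15+rbx*1+0x21]
  "498dbc4752010000"  -- lea rdi,[r15+rax*2+0x152]
  "4a8b7cfd08"  -- mov rdi,QWORD PTR [rbp+r15*8+0x8]
  "4c036528"  -- add r12,QWORD PTR [rbp+0x28]
  "4c896d90"  -- mov QWORD PTR [rbp-0x70],r13
  "4c8b6c2460"  -- mov r13,QWORD PTR [rsp+0x60]
  "4c8d6b02"  -- lea r13,[rbx+0x2]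
  "4d896608"  -- mov QWORD PTR [r14+0x8],r12
  "4e8d64a304"  -- lea r12,[rbx+r12*4+0x4]
  "660fefdb"  -- pxor xmm3,xmm3
  "6644896304"  -- mov WORD PTR [rbx+0x4],r12w
  "73b6"  -- jae 101321
  "747e"  -- je 112e43
  "75da"  -- jne 11127b
  "7d2a"  -- jge 1083a2
  "7f2a"  -- jg 10d4f6
  "81ffff010000"  -- cmp edi,0x1ff
  "83f803"  -- cmp eax,0x3
  "89542410"  -- mov DWORD PTR [rsp+0x10],edx
  "89c5"  -- mov ebp,eax
  "8b45bc"  -- mov eax,DWORD PTR [rbp-0x44]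
  "8b83f8060000"  -- mov eax,DWORD PTR [rbx+0x6f8]
  "8d7703"  -- lea esi,[rdi+0x3]
  "bf02fcffff"  -- mov edi,0xfffffc02
  "c744244000000000"  -- mov DWORD PTR [rsp+0x40],0x0
  "c7849c8002000001000000"  -- mov DWORD PTR [rsp+rbx*4+0x280],0x1
  "e80722ffff"  -- call 100640
  "e810a7ffff"  -- call 100640
  "e81a6bffff"  -- call 100640
  "e8246dffff"  -- call 10d1c0
  "e82d16ffff"  -- call 100300
  "e836f3feff"  -- call 100480
  "e842ecfeff"  -- call 100640
  "e84ceffeff"  -- call 103d00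
  "e856fffeff"  -- call 103d00
  "e865a4feff"  -- call 100300
  "e8700effff"  -- call 100800
  "e87abcfeff"  -- call 1003c0
  "e886f9ffff"  -- call 101e60
  "e89088ffff"  -- call 100800
  "e89a76ffff"  -- call 100640
  "e8a5adfeff"  -- call 101520
  "e8afb3ffff"  -- call 100640
  "e8b8d9feff"  -- call 103d00
  "e8c38cffff"  -- call 10d1c0
  "e8cc8fffff"  -- call 100800
  "e8d773ffff"  -- call 100640
  "e8e19affff"  -- call 100640
  "e8eafefeff"  -- call 103d00
  "e8f265ffff"  -- call 100720
  "e8fdcfffff"  -- call 106960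
  "e93af8ffff"  -- jmp 116059
  "e983000000"  -- jmp 108345
  "e9d8feffff"  -- jmp 1116f7
  "eb44"  -- jmp 10b3f8
  "ebc9"  -- jmp 108e7f
  "f20f2a54240c"  -- cvtsi2sd xmm2,DWORD PTR [rsp+0xc]
  "f20f5ac0"  -- cvtsd2ss xmm0,xmm0
  "f30f10442438"  -- movss xmm0,DWORD PTR [rsp+0x38]
  "f30f106bf8"  -- movss xmm5,DWORD PTR [rbx-0x8]
  "f30f1145f4"  -- movss DWORD PTR [rbp-0xc],xmm0
  "f30f116bf8"  -- movss DWORD PTR [rbx-0x8],xmm5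
  "f30f584bfc"  -- addss xmm1,DWORD PTR [rbx-0x4]
  "f30f59c0"  -- mulss xmm0,xmm0
  "f30f5cec"  -- subss xmm5,xmm4
  "f3410f114f08"  -- movss DWORD PTR [r15+0x8],xmm1
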